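-- pv_equiv track=rewrite | github.com/elmiram/logo_compiler | LogoParser.py | cut_comments
-- ===== SOURCE A (Python) =====
-- def cut_comments(chars: str) -> str:
--     """Cut comments from the given Logo code."""
--     if ';' not in chars:
--         return chars
--
--     new_chars = ""
--
--     inside_bars = False
--     inside_comment = False
--
--     for char in chars:
--         if inside_bars:
--             if char == "|":
--                 inside_bars = False
--             new_chars += char
--         elif inside_comment:
--             if char == "\n":
--                 inside_comment = False
--                 new_chars += char
--         else:
--             if char == "|":
--                 new_chars += char
--                 inside_bars = True
--             elif char == ";":
--                 inside_comment = True
--             else: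
--                 new_chars += char
--     return new_chars
-- ===== SOURCE B (Python) =====
-- def cut_comments(chars: str) -> str:
--     """Cut comments from the given Logo code (segment-jumping via str.partition)."""
--     out = []
--     rest = chars
--     while rest:
--         c, rest = rest[0], rest[1:]
--         if c == '|':
--             bar, sep, rest = rest.partition('|')
--             out.append('|' + bar + sep)
--         elif c == ';':
--             _, sep, rest = rest.partition('\n')
--             out.append(sep)
--         else:
--             out.append(c)
--     return ''.join(out)
-- ===== Notes on version B (the rewrite author's own statement) =====
-- stated objective: alternative
-- what changed: Replaced the character-by-character boolean state machine with a segment-jumping scan: on '|' or ';' it consumes the whole bar-quoted segment or comment at once via str.partition, so no inside_bars/inside_comment flags are carried.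
import Mathlib
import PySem

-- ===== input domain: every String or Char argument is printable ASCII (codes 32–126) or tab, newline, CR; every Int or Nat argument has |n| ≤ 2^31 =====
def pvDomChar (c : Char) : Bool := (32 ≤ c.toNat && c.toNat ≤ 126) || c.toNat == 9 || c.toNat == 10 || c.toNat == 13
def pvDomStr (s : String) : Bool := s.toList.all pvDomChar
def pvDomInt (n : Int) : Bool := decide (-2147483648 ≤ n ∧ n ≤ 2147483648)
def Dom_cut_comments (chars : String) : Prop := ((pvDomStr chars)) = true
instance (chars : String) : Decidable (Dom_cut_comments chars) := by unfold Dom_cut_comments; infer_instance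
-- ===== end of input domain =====

-- B replaces A's char-by-char boolean state machine with a segment-jumping scan (alternative decomposition, same cost).

-- ===== PORT A =====
-- one step of A's for-loop; state = (new_chars, inside_bars, inside_comment)
def cutAStep (st : List Char × Bool × Bool) (c : Char) : List Char × Bool × Bool :=
  match st with
  | (acc, insideBars, insideComment) =>
    if insideBars then
      if c = '|' then (acc ++ [c], false, insideComment) else (acc ++ [c], insideBars, insideComment)
    else if insideComment then
      if c = '\n' then (acc ++ [c], insideBars, false) else (acc, insideBars, insideComment)
    else
      if c = '|' then (acc ++ [c], true, insideComment)
      else if c = ';' then (acc, insideBars, true)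
      else (acc ++ [c], insideBars, insideComment)

def cut_comments (chars : String) : String :=
  if PySem.Str.isIn ";" chars then
    String.ofList (chars.toList.foldl cutAStep ([], false, false)).1
  else chars

-- ===== PORT B =====
-- Source B's while-loop: pops the head char; '|' consumes the whole bar segment at once
-- (rest.partition('|') = takeWhile/dropWhile split), ';' skips to just past '\n'.
def cutBLoop : List Char → List Char
  | [] => []
  | c :: rest =>
    if c = '|' then
      match _h : rest.dropWhile (· ≠ '|') with
      | [] => '|' :: rest.takeWhile (· ≠ '|')
      | s :: t => '|' :: (rest.takeWhile (· ≠ '|') ++ s :: cutBLoop t)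
    else if c = ';' then
      match _h : rest.dropWhile (· ≠ '\n') with
      | [] => []
      | s :: t => s :: cutBLoop t
    else c :: cutBLoop rest
termination_by l => l.length
decreasing_by
  · have := List.length_dropWhile_le (p := fun x => decide (x ≠ '|')) rest
    rw [_h] at this; simp at this ⊢; omega
  · have := List.length_dropWhile_le (p := fun x => decide (x ≠ '\n')) rest
    rw [_h] at this; simp at this ⊢; omega
  · simp

def cut_comments_alt (chars : String) : String :=
  String.ofList (cutBLoop chars.toList)

-- ===== PRECONDITION & SPEC =====
def Spec_cut_comments (chars : String) (out : String) : Prop := out = cut_comments_alt chars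
instance (chars : String) (out : String) : Decidable (Spec_cut_comments chars out) := by unfold Spec_cut_comments; infer_instance

-- ===== CLAIM (what is proved, stated in full; the proofs are below) =====
def Claim_equal_cut_comments : Prop := ∀ (chars : String), Dom_cut_comments chars → Spec_cut_comments chars (cut_comments chars)

-- ===== LEMMAS AND PROOFS =====

-- plain (non-dependent) unfolding equations for cutBLoop
theorem cutBLoop_bar (rest : List Char) :
    cutBLoop ('|' :: rest) =
      (match rest.dropWhile (· ≠ '|') with
        | [] => '|' :: rest.takeWhile (· ≠ '|')
        | s :: t => '|' :: (rest.takeWhile (· ≠ '|') ++ s :: cutBLoop t)) := by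
  rw [cutBLoop, if_pos rfl]
  cases hd : rest.dropWhile (· ≠ '|') <;> simp

theorem cutBLoop_semi (rest : List Char) :
    cutBLoop (';' :: rest) =
      (match rest.dropWhile (· ≠ '\n') with
        | [] => []
        | s :: t => s :: cutBLoop t) := by
  rw [cutBLoop, if_neg (by decide), if_pos rfl]
  cases hd : rest.dropWhile (· ≠ '\n') <;> simp

theorem cutBLoop_other (c : Char) (rest : List Char) (hc : ¬ c = '|') (hc2 : ¬ c = ';') :
    cutBLoop (c :: rest) = c :: cutBLoop rest := by
  rw [cutBLoop]
  rw [if_neg hc, if_neg hc2]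

-- A's loop while inside_bars: it copies chars until (and including) the closing '|'.
theorem barSeg : ∀ (l acc : List Char),
    l.foldl cutAStep (acc, true, false) =
      (match l.dropWhile (· ≠ '|') with
        | [] => (acc ++ l, true, false)
        | s :: t => t.foldl cutAStep (acc ++ l.takeWhile (· ≠ '|') ++ [s], false, false)) := by
  intro l
  induction l with
  | nil => intro acc; simp
  | cons c rest ih =>
    intro acc
    by_cases hc : c = '|'
    · subst hc
      simp [cutAStep, List.dropWhile, List.takeWhile]
    · simp only [List.foldl_cons]
      have hstep : cutAStep (acc, true, false) c = (acc ++ [c], true, false) := by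
        simp [cutAStep, hc]
      rw [hstep, ih]
      simp [List.dropWhile, List.takeWhile, hc]

-- A's loop while inside_comment: it drops chars until '\n', which is kept.
theorem comSeg : ∀ (l acc : List Char),
    l.foldl cutAStep (acc, false, true) =
      (match l.dropWhile (· ≠ '\n') with
        | [] => (acc, false, true)
        | s :: t => t.foldl cutAStep (acc ++ [s], false, false)) := by
  intro l
  induction l with
  | nil => intro acc; simp
  | cons c rest ih =>
    intro acc
    by_cases hc : c = '\n'
    · subst hc
      simp [cutAStep, List.dropWhile]
    · simp only [List.foldl_cons]
      have hstep : cutAStep (acc, false, true) c = (acc, false, true) := by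
        simp [cutAStep, hc]
      rw [hstep, ih]
      simp [List.dropWhile, hc]

-- main invariant: A's fold from the neutral state appends exactly B's output
theorem foldA_eq (l : List Char) : ∀ acc, (l.foldl cutAStep (acc, false, false)).1 = acc ++ cutBLoop l := by
  induction l using cutBLoop.induct with
  | case1 => intro acc; simp [cutBLoop]
  | case2 rest h =>
    intro acc
    rw [cutBLoop_bar]
    simp only [List.foldl_cons, h]
    have hstep : cutAStep (acc, false, false) '|' = (acc ++ ['|'], true, false) := by
      simp [cutAStep]
    rw [hstep, barSeg]
    simp only [h]
    have hsplit := List.takeWhile_append_dropWhile (p := fun x => decide (x ≠ '|')) (l := rest)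
    rw [h] at hsplit
    have h1 : rest.takeWhile (· ≠ '|') = rest := by simpa using hsplit
    simp only [ne_eq, decide_not] at h1
    simp [h1]
  | case3 rest s t h ih =>
    intro acc
    rw [cutBLoop_bar]
    simp only [List.foldl_cons, h]
    have hstep : cutAStep (acc, false, false) '|' = (acc ++ ['|'], true, false) := by
      simp [cutAStep]
    rw [hstep, barSeg]
    simp only [h]
    rw [ih]
    simp
  | case4 rest h hne =>
    intro acc
    rw [cutBLoop_semi]
    simp only [List.foldl_cons, h]
    have hstep : cutAStep (acc, false, false) ';' = (acc, false, true) := by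
      simp [cutAStep]
    rw [hstep, comSeg]
    simp only [ne_eq, decide_not] at h
    simp [h]
  | case5 rest s t h hne ih =>
    intro acc
    rw [cutBLoop_semi]
    simp only [List.foldl_cons, h]
    have hstep : cutAStep (acc, false, false) ';' = (acc, false, true) := by
      simp [cutAStep]
    rw [hstep, comSeg]
    simp only [h]
    rw [ih]
    simp
  | case6 c rest hc hc2 ih =>
    intro acc
    rw [cutBLoop_other c rest hc hc2]
    simp only [List.foldl_cons]
    have hstep : cutAStep (acc, false, false) c = (acc ++ [c], false, false) := by
      simp [cutAStep, hc, hc2]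
    rw [hstep, ih]
    simp

-- when there is no ';', B's loop is the identity
theorem cutBLoop_noSemi (l : List Char) (hs : ';' ∉ l) : cutBLoop l = l := by
  induction l using cutBLoop.induct with
  | case1 => simp [cutBLoop]
  | case2 rest h =>
    rw [cutBLoop_bar]
    simp only [h]
    have hsplit := List.takeWhile_append_dropWhile (p := fun x => decide (x ≠ '|')) (l := rest)
    rw [h] at hsplit
    have h1 : rest.takeWhile (· ≠ '|') = rest := by simpa using hsplit
    simp only [ne_eq, decide_not] at h1
    simp [h1]
  | case3 rest s t h ih =>
    rw [cutBLoop_bar]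
    simp only [h]
    have hsplit := List.takeWhile_append_dropWhile (p := fun x => decide (x ≠ '|')) (l := rest)
    rw [h] at hsplit
    have ht : ';' ∉ t := by
      intro hm
      exact hs (by rw [List.mem_cons]; right; rw [← hsplit]; simp [hm])
    rw [ih ht]
    simp only [ne_eq, decide_not] at hsplit
    simp [hsplit]
  | case4 rest h hne => exact absurd (by simp : ';' ∈ ';' :: rest) hs
  | case5 rest s t h hne ih => exact absurd (by simp : ';' ∈ ';' :: rest) hs
  | case6 c rest hc hc2 ih =>
    rw [cutBLoop_other c rest hc hc2]
    rw [ih (fun hm => hs (List.mem_cons_of_mem _ hm))]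

-- ===== VERDICT (by name: the statement is the Claim_ definition above) =====
theorem cut_comments_spec : Claim_equal_cut_comments := by
  intro chars _
  unfold Spec_cut_comments cut_comments cut_comments_alt
  by_cases h : PySem.Str.isIn ";" chars
  · rw [if_pos h, foldA_eq]
    simp
  · rw [if_neg h]
    have hs : ';' ∉ chars.toList := by
      intro hm
      apply h
      rw [PySem.Str.isIn_iff_infix]
      obtain ⟨s, t, heq⟩ := List.append_of_mem hm
      exact ⟨s, t, by rw [heq]; simp⟩
    rw [cutBLoop_noSemi _ hs]
    simp
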